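-- pv_equiv track=rewrite | github.com/Tradyon/outlier_management | semantic_outlier/semantic_outlier_checker.py | clean_goods_shipped
-- ===== SOURCE A (Python) =====
-- NOISE_TOKENS = {
--     "item",
--     "factura",
--     "invoice",
--     "toneladas",
--     "tonelada",
--     "tonnes",
--     "tons",
--     "ton",
--     "mt",
--     "mts",
--     "kg",
--     "kgs",
--     "g",
--     "lb",
--     "lbs",
--     "load",
--     "count",
--     "weight",
--     "net",
--     "gross",
--     "bags",
--     "bag",
--     "sacks",
--     "sack",
--     "pallet",
--     "pallets",
--     "carton",
--     "cartons",
--     "box",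
--     "boxes",
--     "shipment",
--     "shipper",
--     "consignee",
--     "bill",
--     "lading",
--     "bl",
--     "po",
--     "ref",
--     "reference",
--     "lot",
--     "lots",
--     "container",
--     "containers",
--     "the",
--     "and",
--     "of",
--     "for",
--     "para",
--     "de",
--     "la",
--     "el",
--     "y",
--     "en",
--     "con",
-- }
--
-- MAX_QUERY_TOKENS = 12
--
-- def clean_goods_shipped(text, max_tokens=MAX_QUERY_TOKENS):
--     if not text:
--         return None
--     lowered = text.lower()
--     cleaned = []
--     for ch in lowered:
--         if ch.isalpha() or ch.isspace():
--             cleaned.append(ch)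
--         else:
--             cleaned.append(" ")
--     tokens = [token for token in "".join(cleaned).split() if token not in NOISE_TOKENS]
--     if not tokens:
--         return None
--     if max_tokens:
--         tokens = tokens[:max_tokens]
--     return " ".join(tokens)
-- ===== SOURCE B (Python) =====
-- NOISE_TOKENS = {
--     "item", "factura", "invoice", "toneladas", "tonelada", "tonnes", "tons",
--     "ton", "mt", "mts", "kg", "kgs", "g", "lb", "lbs", "load", "count",
--     "weight", "net", "gross", "bags", "bag", "sacks", "sack", "pallet",
--     "pallets", "carton", "cartons", "box", "boxes", "shipment", "shipper",
--     "consignee", "bill", "lading", "bl", "po", "ref", "reference", "lot",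
--     "lots", "container", "containers", "the", "and", "of", "for", "para",
--     "de", "la", "el", "y", "en", "con",
-- }
--
-- MAX_QUERY_TOKENS = 12
--
--
-- def clean_goods_shipped(text, max_tokens=MAX_QUERY_TOKENS):
--     # Single-pass tokenizer: keep a running letter buffer, flush it on any
--     # non-letter character, filtering noise tokens at flush time.
--     if not text:
--         return None
--     tokens = []
--     current = []
--     for ch in text.lower():
--         if ch.isalpha():
--             current.append(ch)
--         else:
--             if current:
--                 tok = "".join(current)
--                 if tok not in NOISE_TOKENS:
--                     tokens.append(tok)
--                 current = []
--     if current: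
--         tok = "".join(current)
--         if tok not in NOISE_TOKENS:
--             tokens.append(tok)
--     if not tokens:
--         return None
--     if max_tokens:
--         tokens = tokens[:max_tokens]
--     return " ".join(tokens)
-- ===== Notes on version B (the rewrite author's own statement) =====
-- stated objective: alternative
-- what changed: Replaces A's three-stage pipeline (build a cleaned character list, join, str.split(), filter comprehension) with a single state-carrying pass over the lowered text that maintains a current-token buffer, flushing and noise-filtering it at each non-letter character.
import Mathlib
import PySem

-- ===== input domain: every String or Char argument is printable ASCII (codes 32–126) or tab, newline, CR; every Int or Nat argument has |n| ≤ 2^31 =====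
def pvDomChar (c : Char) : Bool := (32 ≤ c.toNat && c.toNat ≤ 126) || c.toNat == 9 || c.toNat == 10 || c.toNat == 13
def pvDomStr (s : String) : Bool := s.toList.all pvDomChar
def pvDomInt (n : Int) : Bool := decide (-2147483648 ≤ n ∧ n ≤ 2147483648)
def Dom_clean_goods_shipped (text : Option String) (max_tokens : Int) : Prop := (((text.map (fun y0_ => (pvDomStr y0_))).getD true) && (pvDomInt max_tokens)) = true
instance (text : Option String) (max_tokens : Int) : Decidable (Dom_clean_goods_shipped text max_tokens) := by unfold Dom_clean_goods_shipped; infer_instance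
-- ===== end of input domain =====

-- B fuses A's clean-then-split-then-filter pipeline into a single state-carrying pass
-- over the lowered text (objective: alternative decomposition, same cost).

-- NOISE_TOKENS (shared constant of the module, used by both ports)
def pvNoiseTokens : List (List Char) :=
  ["item".toList, "factura".toList, "invoice".toList, "toneladas".toList, "tonelada".toList, "tonnes".toList,
   "tons".toList, "ton".toList, "mt".toList, "mts".toList, "kg".toList, "kgs".toList,
   "g".toList, "lb".toList, "lbs".toList, "load".toList, "count".toList, "weight".toList,
   "net".toList, "gross".toList, "bags".toList, "bag".toList, "sacks".toList, "sack".toList,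
   "pallet".toList, "pallets".toList, "carton".toList, "cartons".toList, "box".toList, "boxes".toList,
   "shipment".toList, "shipper".toList, "consignee".toList, "bill".toList, "lading".toList, "bl".toList,
   "po".toList, "ref".toList, "reference".toList, "lot".toList, "lots".toList, "container".toList,
   "containers".toList, "the".toList, "and".toList, "of".toList, "for".toList, "para".toList,
   "de".toList, "la".toList, "el".toList, "y".toList, "en".toList, "con".toList]

-- ===== PORT A =====
def clean_goods_shipped (text : Option String) (max_tokens : Int) : Option String :=
  match text with
  | none => none
  | some s =>
    if s.toList.isEmpty then none
    else
      let lowered := PySem.Chars.lower s.toList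
      let cleaned := lowered.foldl
        (fun acc ch =>
          acc ++ [if PySem.Chars.isalpha ch || PySem.Chars.isspace ch then ch else ' ']) []
      let tokens := (PySem.Chars.split₀ cleaned).filter (fun t => !(pvNoiseTokens.contains t))
      if tokens.isEmpty then none
      else
        let tokens := if max_tokens ≠ 0 then PySem.List.slice tokens none (some max_tokens) else tokens
        some (String.ofList (PySem.Chars.join [' '] tokens))

-- ===== PORT B =====
-- flush the current buffer: append it as a token unless empty or a noise token
def pvFlush (tokens : List (List Char)) (cur : List Char) : List (List Char) :=
  if cur.isEmpty then tokens
  else if pvNoiseTokens.contains cur then tokens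
  else tokens ++ [cur]

def clean_goods_shipped_alt (text : Option String) (max_tokens : Int) : Option String :=
  match text with
  | none => none
  | some s =>
    if s.toList.isEmpty then none
    else
      let st := (PySem.Chars.lower s.toList).foldl
        (fun (st : List (List Char) × List Char) ch =>
          if PySem.Chars.isalpha ch then (st.1, st.2 ++ [ch])
          else (pvFlush st.1 st.2, []))
        ([], [])
      let tokens := pvFlush st.1 st.2
      if tokens.isEmpty then none
      else
        let tokens := if max_tokens ≠ 0 then PySem.List.slice tokens none (some max_tokens) else tokens
        some (String.ofList (PySem.Chars.join [' '] tokens))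

-- ===== PRECONDITION & SPEC =====
def Spec_clean_goods_shipped (text : Option String) (max_tokens : Int) (out : Option String) : Prop := out = clean_goods_shipped_alt text max_tokens
instance (text : Option String) (max_tokens : Int) (out : Option String) : Decidable (Spec_clean_goods_shipped text max_tokens out) := by unfold Spec_clean_goods_shipped; infer_instance

-- ===== CLAIM (what is proved, stated in full; the proofs are below) =====
def Claim_equal_clean_goods_shipped : Prop := ∀ (text : Option String) (max_tokens : Int), Dom_clean_goods_shipped text max_tokens → Spec_clean_goods_shipped text max_tokens (clean_goods_shipped text max_tokens)

-- ===== LEMMAS AND PROOFS =====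

-- A's per-character replacement
def pvRepl (ch : Char) : Char :=
  if PySem.Chars.isalpha ch || PySem.Chars.isspace ch then ch else ' '

-- maximal runs of alphabetic characters, with a pending buffer `cur`
def pvRuns (cur : List Char) : List Char → List (List Char)
  | [] => if cur.isEmpty then [] else [cur]
  | c :: cs =>
    if PySem.Chars.isalpha c then pvRuns (cur ++ [c]) cs
    else if cur.isEmpty then pvRuns [] cs else cur :: pvRuns [] cs

theorem pv_isalpha_not_isspace (c : Char) (h : PySem.Chars.isalpha c = true) :
    PySem.Chars.isspace c = false := by
  simp only [PySem.Chars.isalpha, PySem.Chars.isupper, PySem.Chars.islower,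
    Bool.or_eq_true, Bool.and_eq_true, decide_eq_true_eq, Char.le_def] at h
  have h65 : ('A').val.toNat = 65 := by decide
  have h90 : ('Z').val.toNat = 90 := by decide
  have h97 : ('a').val.toNat = 97 := by decide
  have h122 : ('z').val.toNat = 122 := by decide
  have hb : (65 ≤ c.val.toNat ∧ c.val.toNat ≤ 90) ∨ (97 ≤ c.val.toNat ∧ c.val.toNat ≤ 122) := by
    rcases h with ⟨h1, h2⟩ | ⟨h1, h2⟩
    · exact Or.inl ⟨h65 ▸ UInt32.le_iff_toNat_le.mp h1, h90 ▸ UInt32.le_iff_toNat_le.mp h2⟩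
    · exact Or.inr ⟨h97 ▸ UInt32.le_iff_toNat_le.mp h1, h122 ▸ UInt32.le_iff_toNat_le.mp h2⟩
  simp only [PySem.Chars.isspace, Char.toNat]
  simp only [Bool.or_eq_false_iff, Bool.and_eq_false_iff, decide_eq_false_iff_not]
  omega

theorem pv_repl_space (c : Char) (h : PySem.Chars.isalpha c = false) :
    PySem.Chars.isspace (pvRepl c) = true := by
  unfold pvRepl
  by_cases hs : PySem.Chars.isspace c = true
  · simp [h, hs]
  · simp only [Bool.not_eq_true] at hs
    simp [h, hs]; decide

theorem pv_go_runs (cs : List Char) : ∀ (cur : List Char) (acc : List (List Char)),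
    PySem.Chars.split₀.go (cs.map pvRepl) cur.reverse acc = acc.reverse ++ pvRuns cur cs := by
  induction cs with
  | nil =>
    intro cur acc
    simp only [List.map_nil, PySem.Chars.split₀.go, pvRuns]
    by_cases hc : cur.isEmpty
    · simp [List.isEmpty_iff.mp hc]
    · simp [hc]
  | cons c cs ih =>
    intro cur acc
    simp only [List.map_cons, PySem.Chars.split₀.go]
    by_cases ha : PySem.Chars.isalpha c = true
    · have hrepl : pvRepl c = c := by simp [pvRepl, ha]
      have hsp : PySem.Chars.isspace c = false := pv_isalpha_not_isspace c ha
      rw [hrepl, hsp]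
      rw [if_neg (show ¬(false = true) by decide)]
      have : c :: cur.reverse = (cur ++ [c]).reverse := by simp
      rw [this, ih (cur ++ [c]) acc]
      simp [pvRuns, ha]
    · have ha' : PySem.Chars.isalpha c = false := by simpa using ha
      have hsp : PySem.Chars.isspace (pvRepl c) = true := pv_repl_space c ha'
      rw [hsp, if_pos rfl]
      by_cases hc : cur.isEmpty
      · have hcur : cur = [] := List.isEmpty_iff.mp hc
        subst hcur
        simp only [List.reverse_nil]
        have := ih [] acc
        simpa [pvRuns, ha', hc] using this
      · rw [List.isEmpty_reverse, if_neg hc]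
        have : PySem.Chars.split₀.go (cs.map pvRepl) [] (cur.reverse.reverse :: acc)
            = PySem.Chars.split₀.go (cs.map pvRepl) ([] : List Char).reverse (cur :: acc) := by
          simp
        rw [this, ih [] (cur :: acc)]
        simp [pvRuns, ha', hc]

theorem pv_split₀_runs (cs : List Char) :
    PySem.Chars.split₀ (cs.map pvRepl) = pvRuns [] cs := by
  have := pv_go_runs cs [] []
  simpa [PySem.Chars.split₀] using this

theorem pv_bfold (cs : List Char) : ∀ (toks : List (List Char)) (cur : List Char),
    pvFlush
      (cs.foldl
        (fun (st : List (List Char) × List Char) ch =>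
          if PySem.Chars.isalpha ch then (st.1, st.2 ++ [ch])
          else (pvFlush st.1 st.2, []))
        (toks, cur)).1
      (cs.foldl
        (fun (st : List (List Char) × List Char) ch =>
          if PySem.Chars.isalpha ch then (st.1, st.2 ++ [ch])
          else (pvFlush st.1 st.2, []))
        (toks, cur)).2
    = toks ++ (pvRuns cur cs).filter (fun t => !(pvNoiseTokens.contains t)) := by
  induction cs with
  | nil =>
    intro toks cur
    simp only [List.foldl_nil, pvRuns, pvFlush]
    by_cases hc : cur.isEmpty
    · simp [hc]
    · by_cases hn : cur ∈ pvNoiseTokens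
      · simp [hc, hn]
      · simp [hc, hn]
  | cons c cs ih =>
    intro toks cur
    simp only [List.foldl_cons]
    by_cases ha : PySem.Chars.isalpha c = true
    · simp only [ha, if_true]
      rw [ih toks (cur ++ [c])]
      simp [pvRuns, ha]
    · have ha' : PySem.Chars.isalpha c = false := by simpa using ha
      simp only [ha', Bool.false_eq_true, if_false]
      rw [ih (pvFlush toks cur) []]
      by_cases hc : cur.isEmpty
      · have hcur : cur = [] := List.isEmpty_iff.mp hc
        subst hcur
        simp [pvRuns, ha', pvFlush]
      · have h1 : pvRuns cur (c :: cs) = cur :: pvRuns [] cs := by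
          simp [pvRuns, ha', hc]
        rw [h1, List.filter_cons]
        by_cases hn : cur ∈ pvNoiseTokens
        · simp [pvFlush, hc, hn]
        · simp [pvFlush, hc, hn]

theorem pv_tokens_eq (ls : List Char) :
    (PySem.Chars.split₀
        (ls.foldl
          (fun acc ch =>
            acc ++ [if PySem.Chars.isalpha ch || PySem.Chars.isspace ch then ch else ' ']) [])).filter
      (fun t => !(pvNoiseTokens.contains t))
    = pvFlush
        (ls.foldl
          (fun (st : List (List Char) × List Char) ch =>
            if PySem.Chars.isalpha ch then (st.1, st.2 ++ [ch])
            else (pvFlush st.1 st.2, []))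
          ([], [])).1
        (ls.foldl
          (fun (st : List (List Char) × List Char) ch =>
            if PySem.Chars.isalpha ch then (st.1, st.2 ++ [ch])
            else (pvFlush st.1 st.2, []))
          ([], [])).2 := by
  have hmap : ls.foldl
      (fun acc ch =>
        acc ++ [if PySem.Chars.isalpha ch || PySem.Chars.isspace ch then ch else ' ']) []
      = ls.map pvRepl := by
    simpa [pvRepl] using PySem.List.foldl_append_singleton_eq_map pvRepl ls []
  rw [hmap, pv_split₀_runs, pv_bfold ls [] []]
  simp

-- ===== VERDICT (by name: the statement is the Claim_ definition above) =====
theorem clean_goods_shipped_spec : Claim_equal_clean_goods_shipped := by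
  intro text max_tokens _
  unfold Spec_clean_goods_shipped
  cases text with
  | none => rfl
  | some s =>
    by_cases he : s.toList.isEmpty
    · simp [clean_goods_shipped, clean_goods_shipped_alt, he]
    · simp only [clean_goods_shipped, clean_goods_shipped_alt, he, Bool.false_eq_true, if_false]
      rw [pv_tokens_eq (PySem.Chars.lower s.toList)]
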